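-- pv_equiv track=rewrite | github.com/HarleyCoops/nanochatAquaRat | scripts/download_gcs_reports.py | find_latest_run
-- ===== SOURCE A (Python) =====
-- def find_latest_run(runs):
--     """Find the most recent run based on naming pattern."""
--     if not runs:
--         return None
--
--     # Try to find runs with timestamps (format: YYYYMMDD-HHMMSS)
--     timestamp_runs = []
--     other_runs = []
--
--     for run in runs:
--         if '-' in run and len(run.split('-')) >= 3:
--             parts = run.split('-')
--             if len(parts[0]) == 8 and len(parts[1]) == 6:  # YYYYMMDD-HHMMSS
--                 try:
--                     timestamp_runs.append((run, parts[0], parts[1]))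
--                 except:
--                     other_runs.append(run)
--             else:
--                 other_runs.append(run)
--         else:
--             other_runs.append(run)
--
--     if timestamp_runs:
--         # Sort by date and time
--         timestamp_runs.sort(key=lambda x: (x[1], x[2]), reverse=True)
--         return timestamp_runs[0][0]
--
--     # Fallback to alphabetical sorting
--     return sorted(runs)[-1]
-- ===== SOURCE B (Python) =====
-- def find_latest_run(runs):
--     """Find the most recent run based on naming pattern."""
--     # Single pass: track the best timestamp run and the alphabetical max at once.
--     best_ts = None     # (("YYYYMMDD", "HHMMSS"), run) with maximal key, first occurrence wins
--     best_plain = None  # alphabetically greatest run so far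
--     for run in runs:
--         if best_plain is None or run > best_plain:
--             best_plain = run
--         if '-' in run:
--             parts = run.split('-')
--             if len(parts) >= 3 and len(parts[0]) == 8 and len(parts[1]) == 6:
--                 key = (parts[0], parts[1])
--                 if best_ts is None or key > best_ts[0]:
--                     best_ts = (key, run)
--     if best_ts is not None:
--         return best_ts[1]
--     return best_plain
-- ===== Notes on version B (the rewrite author's own statement) =====
-- stated objective: faster
-- what changed: A partitions the runs into two lists and then sorts (the timestamp runs by (date,time) reverse, or the whole list alphabetically) to pick the winner; B makes one pass keeping the best timestamp run and the alphabetical maximum simultaneously, with no partition and no sort.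
import Mathlib
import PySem

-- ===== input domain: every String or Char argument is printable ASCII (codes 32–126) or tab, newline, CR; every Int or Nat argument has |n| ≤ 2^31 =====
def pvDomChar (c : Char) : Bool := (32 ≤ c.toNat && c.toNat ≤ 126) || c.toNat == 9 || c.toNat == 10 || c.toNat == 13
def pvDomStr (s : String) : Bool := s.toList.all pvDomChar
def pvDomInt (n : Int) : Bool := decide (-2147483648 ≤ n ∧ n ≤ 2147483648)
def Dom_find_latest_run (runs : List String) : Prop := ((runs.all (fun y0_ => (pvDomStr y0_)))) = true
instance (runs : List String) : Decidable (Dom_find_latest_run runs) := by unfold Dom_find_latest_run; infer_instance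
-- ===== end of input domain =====

-- B replaces A's partition + reverse-sort (+ full alphabetical sort for the fallback) by one
-- single pass that tracks the best timestamp run and the alphabetical maximum simultaneously.

-- ===== PORT A =====
def find_latest_run (runs : List String) : Option String :=
  if runs = [] then none
  else
    -- the loop partitioning runs into timestamp_runs (st.1) and other_runs (st.2)
    let p := runs.foldl
      (fun (st : List (String × String × String) × List String) run =>
        if PySem.Str.isIn "-" run ∧ 3 ≤ ((PySem.Str.split? run "-").getD []).length then
          let parts := (PySem.Str.split? run "-").getD []
          if PySem.Str.len (parts.getD 0 "") = 8 ∧ PySem.Str.len (parts.getD 1 "") = 6 then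
            (st.1 ++ [(run, parts.getD 0 "", parts.getD 1 "")], st.2)
          else (st.1, st.2 ++ [run])
        else (st.1, st.2 ++ [run]))
      ([], [])
    if p.1 ≠ [] then
      -- timestamp_runs.sort(key=lambda x: (x[1], x[2]), reverse=True); return timestamp_runs[0][0]
      (PySem.List.sorted2 p.1 (fun x => x.2.1) (fun x => x.2.2) true).head?.map (fun x => x.1)
    else
      -- return sorted(runs)[-1]
      PySem.List.pyGet? (PySem.List.sorted runs (fun x => x) false) (-1)

-- ===== PORT B =====
def find_latest_run_alt (runs : List String) : Option String :=
  let st := runs.foldl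
    (fun (st : Option ((String × String) × String) × Option String) run =>
      let bp := match st.2 with
        | none => some run
        | some b => if b < run then some run else some b
      let bt :=
        if PySem.Str.isIn "-" run then
          let parts := (PySem.Str.split? run "-").getD []
          if 3 ≤ parts.length ∧ PySem.Str.len (parts.getD 0 "") = 8 ∧
              PySem.Str.len (parts.getD 1 "") = 6 then
            let key := (parts.getD 0 "", parts.getD 1 "")
            match st.1 with
            | none => some (key, run)
            -- Python's tuple-of-strings `key > best[0]` ported componentwise (exact)
            | some b => if b.1.1 < key.1 ∨ (b.1.1 = key.1 ∧ b.1.2 < key.2) then some (key, run) else st.1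
          else st.1
        else st.1
      (bt, bp))
    (none, none)
  match st.1 with
  | some b => some b.2
  | none => st.2

-- ===== PRECONDITION & SPEC =====
def Spec_find_latest_run (runs : List String) (out : Option String) : Prop := out = find_latest_run_alt runs
instance (runs : List String) (out : Option String) : Decidable (Spec_find_latest_run runs out) := by unfold Spec_find_latest_run; infer_instance

-- ===== CLAIM (what is proved, stated in full; the proofs are below) =====
def Claim_equal_find_latest_run : Prop := ∀ (runs : List String), Dom_find_latest_run runs → Spec_find_latest_run runs (find_latest_run runs)

-- ===== LEMMAS AND PROOFS =====

-- the timestamp test both programs apply, with its extracted (date, time) key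
def tsKey? (run : String) : Option (String × String) :=
  let parts := (PySem.Str.split? run "-").getD []
  if PySem.Str.isIn "-" run ∧ 3 ≤ parts.length ∧ PySem.Str.len (parts.getD 0 "") = 8 ∧
      PySem.Str.len (parts.getD 1 "") = 6 then
    some (parts.getD 0 "", parts.getD 1 "")
  else none

-- B's "best timestamp so far" step, over (key, run) pairs
def amaxStep (b : Option ((String × String) × String)) (x : (String × String) × String) :
    Option ((String × String) × String) :=
  match b with
  | none => some x
  | some h => if h.1.1 < x.1.1 ∨ (h.1.1 = x.1.1 ∧ h.1.2 < x.1.2) then some x else some h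

-- the same step over A's (run, date, time) triples
def tstep (b : Option (String × String × String)) (x : String × String × String) :
    Option (String × String × String) :=
  match b with
  | none => some x
  | some h => if h.2.1 < x.2.1 ∨ (h.2.1 = x.2.1 ∧ h.2.2 < x.2.2) then some x else some h

-- B's "alphabetical max so far" step
def pmaxStep (b : Option String) (r : String) : Option String :=
  match b with
  | none => some r
  | some h => if h < r then some r else some h

theorem a_fold_fst (runs : List String) (acc : List (String × String × String) × List String) :
    (runs.foldl
      (fun (st : List (String × String × String) × List String) run =>
        if PySem.Str.isIn "-" run ∧ 3 ≤ ((PySem.Str.split? run "-").getD []).length then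
          let parts := (PySem.Str.split? run "-").getD []
          if PySem.Str.len (parts.getD 0 "") = 8 ∧ PySem.Str.len (parts.getD 1 "") = 6 then
            (st.1 ++ [(run, parts.getD 0 "", parts.getD 1 "")], st.2)
          else (st.1, st.2 ++ [run])
        else (st.1, st.2 ++ [run])) acc).1
    = acc.1 ++ runs.filterMap (fun r => (tsKey? r).map (fun k => (r, k.1, k.2))) := by
  induction runs generalizing acc with
  | nil => simp
  | cons r rs ih =>
    simp only [List.foldl_cons, List.filterMap_cons]
    rw [ih]
    by_cases h1 : (PySem.Str.isIn "-" r = true ∧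
        3 ≤ ((PySem.Str.split? r "-").getD []).length)
    · by_cases h2 : (PySem.Str.len (((PySem.Str.split? r "-").getD []).getD 0 "") = 8 ∧
          PySem.Str.len (((PySem.Str.split? r "-").getD []).getD 1 "") = 6)
      · rw [if_pos h1]
        rw [if_pos h2]
        unfold tsKey?
        rw [if_pos (by exact ⟨h1.1, h1.2, h2.1, h2.2⟩)]
        simp
      · rw [if_pos h1]
        rw [if_neg h2]
        unfold tsKey?
        rw [if_neg (by intro h; exact h2 ⟨h.2.2.1, h.2.2.2⟩)]
        simp
    · rw [if_neg h1]
      unfold tsKey?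
      rw [if_neg (by intro h; exact h1 ⟨h.1, h.2.1⟩)]
      simp

theorem b_fold_eq (runs : List String) (b1 : Option ((String × String) × String)) (b2 : Option String) :
    runs.foldl
      (fun (st : Option ((String × String) × String) × Option String) run =>
        let bp := match st.2 with
          | none => some run
          | some b => if b < run then some run else some b
        let bt :=
          if PySem.Str.isIn "-" run then
            let parts := (PySem.Str.split? run "-").getD []
            if 3 ≤ parts.length ∧ PySem.Str.len (parts.getD 0 "") = 8 ∧
                PySem.Str.len (parts.getD 1 "") = 6 then
              let key := (parts.getD 0 "", parts.getD 1 "")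
              match st.1 with
              | none => some (key, run)
              | some b => if b.1.1 < key.1 ∨ (b.1.1 = key.1 ∧ b.1.2 < key.2) then some (key, run) else st.1
            else st.1
          else st.1
        (bt, bp)) (b1, b2)
    = ((runs.filterMap (fun r => (tsKey? r).map (fun k => (k, r)))).foldl amaxStep b1,
       runs.foldl pmaxStep b2) := by
  induction runs generalizing b1 b2 with
  | nil => simp
  | cons r rs ih =>
    simp only [List.foldl_cons, List.filterMap_cons]
    rw [ih]
    congr 1
    by_cases h1 : PySem.Str.isIn "-" r = true
    · by_cases h2 : (3 ≤ ((PySem.Str.split? r "-").getD []).length ∧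
          PySem.Str.len (((PySem.Str.split? r "-").getD []).getD 0 "") = 8 ∧
          PySem.Str.len (((PySem.Str.split? r "-").getD []).getD 1 "") = 6)
      · rw [if_pos h1, if_pos h2]
        unfold tsKey?
        rw [if_pos (by exact ⟨h1, h2⟩)]
        simp only [Option.map_some, List.foldl_cons]
        congr 1
        cases b1 with
        | none => rfl
        | some h => rfl
      · rw [if_pos h1, if_neg h2]
        unfold tsKey?
        rw [if_neg (by intro h; exact h2 h.2)]
        rfl
    · rw [if_neg h1]
      unfold tsKey?
      rw [if_neg (by intro h; exact h1 h.1)]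
      rfl

theorem head?_insertBy {α : Type} (before : α → α → Bool) (x : α) (acc : List α) :
    (PySem.List.insertBy before x acc).head?
    = some (match acc.head? with | none => x | some h => if before x h then x else h) := by
  cases acc with
  | nil => rfl
  | cons y ys =>
    simp only [PySem.List.insertBy, List.head?_cons]
    split_ifs <;> rfl

theorem head?_foldl_insertBy {α : Type} (before : α → α → Bool) (l : List α) (acc : List α) :
    (l.foldl (fun a x => PySem.List.insertBy before x a) acc).head?
    = l.foldl (fun b x => some (match b with | none => x | some h => if before x h then x else h))
        acc.head? := by
  induction l generalizing acc with
  | nil => rfl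
  | cons x xs ih =>
    simp only [List.foldl_cons]
    rw [ih, head?_insertBy]

-- the head of A's stable reverse sort is the first key-maximal element, i.e. a strict-max fold
theorem head_sorted2_rev (l : List (String × String × String)) :
    (PySem.List.sorted2 l (fun x => x.2.1) (fun x => x.2.2) true).head?
    = l.foldl tstep none := by
  show (l.foldl (fun a x => PySem.List.insertBy
      (fun a b => (decide ((fun x : String × String × String => x.2.1) b < (fun x : String × String × String => x.2.1) a) ||
        (!decide ((fun x : String × String × String => x.2.1) a < (fun x : String × String × String => x.2.1) b) &&
          decide ((fun x : String × String × String => x.2.2) b < (fun x : String × String × String => x.2.2) a)))) x a) []).head? = _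
  rw [head?_foldl_insertBy]
  show List.foldl _ none l = _
  congr 1
  funext b x
  cases b with
  | none => rfl
  | some h =>
    simp only [tstep]
    by_cases hc : h.2.1 < x.2.1 ∨ (h.2.1 = x.2.1 ∧ h.2.2 < x.2.2)
    · rw [if_pos hc, if_pos]
      simp only [Bool.or_eq_true, Bool.and_eq_true, Bool.not_eq_eq_eq_not, Bool.not_true,
        decide_eq_true_eq, decide_eq_false_iff_not]
      rcases hc with h1 | ⟨h1, h2⟩
      · exact Or.inl h1
      · exact Or.inr ⟨by rw [h1]; exact lt_irrefl _, h2⟩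
    · rw [if_neg hc, if_neg]
      simp only [Bool.or_eq_true, Bool.and_eq_true, Bool.not_eq_eq_eq_not, Bool.not_true,
        decide_eq_true_eq, decide_eq_false_iff_not]
      rintro (h1 | ⟨h1, h2⟩)
      · exact absurd h1 (by tauto)
      · refine absurd h2 ?_
        have hd : h.2.1 = x.2.1 := le_antisymm (not_lt.mp h1) (le_of_not_gt (by tauto))
        intro ht; exact hc (Or.inr ⟨hd, ht⟩)

-- B's fold over (key, run) pairs is A's fold over (run, date, time) triples, transported
theorem amax_map_flip (l : List (String × String × String)) (b : Option (String × String × String)) :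
    (l.map (fun t => (t.2, t.1))).foldl amaxStep (b.map (fun t => (t.2, t.1)))
    = (l.foldl tstep b).map (fun t => (t.2, t.1)) := by
  induction l generalizing b with
  | nil => rfl
  | cons x xs ih =>
    simp only [List.map_cons, List.foldl_cons]
    rw [← ih]
    congr 1
    cases b with
    | none => rfl
    | some h =>
      simp only [Option.map_some, amaxStep, tstep]
      split_ifs <;> rfl

theorem pair_eq_tri_map (runs : List String) :
    runs.filterMap (fun r => (tsKey? r).map (fun k => (k, r)))
    = (runs.filterMap (fun r => (tsKey? r).map (fun k => (r, k.1, k.2)))).map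
        (fun t => (t.2, t.1)) := by
  rw [List.map_filterMap]
  congr 1
  funext r
  cases tsKey? r with
  | none => rfl
  | some k => rfl

theorem tfold_some (l : List (String × String × String)) (b : Option (String × String × String))
    (h : l ≠ [] ∨ b.isSome) : (l.foldl tstep b).isSome := by
  induction l generalizing b with
  | nil =>
    rcases h with h | h
    · exact absurd rfl h
    · exact h
  | cons x xs ih =>
    simp only [List.foldl_cons]
    refine ih _ (Or.inr ?_)
    cases b with
    | none => rfl
    | some hd =>
      simp only [tstep]
      split_ifs <;> rfl

theorem pmax_spec (l : List String) (b : Option String) (m : String)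
    (h : l.foldl pmaxStep b = some m) :
    (∀ x ∈ l, x ≤ m) ∧ (m ∈ l ∨ b = some m) ∧ (∀ y, b = some y → y ≤ m) := by
  induction l generalizing b with
  | nil =>
    simp only [List.foldl_nil] at h
    exact ⟨by simp, Or.inr h, fun y hy => by rw [hy] at h; exact le_of_eq (Option.some_inj.mp h)⟩
  | cons x xs ih =>
    simp only [List.foldl_cons] at h
    cases b with
    | none =>
      obtain ⟨h1, h2, h3⟩ := ih (some x) h
      have hx : x ≤ m := h3 x rfl
      refine ⟨?_, ?_, by simp⟩
      · intro u hu; rcases List.mem_cons.mp hu with rfl | hu'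
        · exact hx
        · exact h1 u hu'
      · rcases h2 with hm | hm
        · exact Or.inl (List.mem_cons_of_mem _ hm)
        · exact Or.inl (by rw [← Option.some_inj.mp hm]; exact List.mem_cons_self)
    | some hd =>
      by_cases hlt : hd < x
      · rw [show pmaxStep (some hd) x = some x from by simp [pmaxStep, hlt]] at h
        obtain ⟨h1, h2, h3⟩ := ih (some x) h
        have hx : x ≤ m := h3 x rfl
        refine ⟨?_, ?_, ?_⟩
        · intro u hu; rcases List.mem_cons.mp hu with rfl | hu'
          · exact hx
          · exact h1 u hu'
        · rcases h2 with hm | hm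
          · exact Or.inl (List.mem_cons_of_mem _ hm)
          · exact Or.inl (by rw [← Option.some_inj.mp hm]; exact List.mem_cons_self)
        · intro y hy; rw [← Option.some_inj.mp hy]; exact (le_of_lt hlt).trans hx
      · rw [show pmaxStep (some hd) x = some hd from by simp [pmaxStep, hlt]] at h
        obtain ⟨h1, h2, h3⟩ := ih (some hd) h
        have hhd : hd ≤ m := h3 hd rfl
        refine ⟨?_, ?_, ?_⟩
        · intro u hu; rcases List.mem_cons.mp hu with rfl | hu'
          · exact (not_lt.mp hlt).trans hhd
          · exact h1 u hu'
        · rcases h2 with hm | hm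
          · exact Or.inl (List.mem_cons_of_mem _ hm)
          · exact Or.inr hm
        · intro y hy; rw [← Option.some_inj.mp hy]; exact hhd

theorem pmax_some (l : List String) (b : Option String) (h : l ≠ [] ∨ b.isSome) :
    (l.foldl pmaxStep b).isSome := by
  induction l generalizing b with
  | nil =>
    rcases h with h | h
    · exact absurd rfl h
    · exact h
  | cons x xs ih =>
    simp only [List.foldl_cons]
    refine ih _ (Or.inr ?_)
    cases b with
    | none => rfl
    | some hd =>
      simp only [pmaxStep]
      split_ifs <;> rfl

theorem pyGet_neg_one {α : Type} (l : List α) : PySem.List.pyGet? l (-1) = l.getLast? := by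
  cases l with
  | nil => rfl
  | cons x xs =>
    simp only [PySem.List.pyGet?, PySem.List.pyIdx?]
    norm_num
    rw [List.getLast?_eq_getElem?]
    simp

theorem pairwise_le_getLast (l : List String) (hp : l.Pairwise (fun a b => a ≤ b)) :
    ∀ (h : l ≠ []), ∀ x ∈ l, x ≤ l.getLast h := by
  induction l with
  | nil => intro h; simp at h
  | cons a as ih =>
    intro h x hx
    rcases List.pairwise_cons.mp hp with ⟨ha, has⟩
    cases as with
    | nil => simp at hx; simp [hx]
    | cons b bs =>
      rw [List.getLast_cons (by simp)]
      rcases List.mem_cons.mp hx with rfl | hx'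
      · exact ha _ (List.getLast_mem _)
      · exact ih has (by simp) x hx'

theorem amax_map_flip_none (l : List (String × String × String)) :
    (l.map (fun t => (t.2, t.1))).foldl amaxStep none
    = (l.foldl tstep none).map (fun t => (t.2, t.1)) := by
  simpa using amax_map_flip l none

-- ===== VERDICT (by name: the statement is the Claim_ definition above) =====
theorem find_latest_run_spec : Claim_equal_find_latest_run := by
  intro runs _
  unfold Spec_find_latest_run
  by_cases hrun : runs = []
  · subst hrun; rfl
  · unfold find_latest_run find_latest_run_alt
    rw [if_neg hrun]
    simp only [b_fold_eq runs none none, a_fold_fst runs ([], []), List.nil_append]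
    rw [pair_eq_tri_map, amax_map_flip_none]
    by_cases hT : runs.filterMap (fun r => (tsKey? r).map (fun k => (r, k.1, k.2))) = []
    · rw [if_neg (fun hne => hne hT), hT]
      simp only [List.foldl_nil, Option.map_none]
      obtain ⟨m, hm⟩ := Option.isSome_iff_exists.mp (pmax_some runs none (Or.inl hrun))
      rw [hm]
      obtain ⟨h1, h2, _⟩ := pmax_spec runs none m hm
      have hmem : m ∈ runs := h2.resolve_right (by simp)
      have hperm := PySem.List.sorted_perm runs (fun x => x) false
      have hS : PySem.List.sorted runs (fun x => x) false ≠ [] := by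
        intro hnil
        rw [hnil] at hperm
        exact hrun hperm.nil_eq.symm
      rw [pyGet_neg_one, List.getLast?_eq_some_getLast hS]
      have hub := pairwise_le_getLast _ (PySem.List.sorted_pairwise runs (fun x => x)) hS
      have hMmem : (PySem.List.sorted runs (fun x => x) false).getLast hS ∈ runs :=
        hperm.mem_iff.mp (List.getLast_mem hS)
      have hmS : m ∈ PySem.List.sorted runs (fun x => x) false := hperm.mem_iff.mpr hmem
      exact congrArg some (le_antisymm (h1 _ hMmem) (hub m hmS))
    · rw [if_pos hT, head_sorted2_rev]
      obtain ⟨t, ht⟩ := Option.isSome_iff_exists.mp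
        (tfold_some (runs.filterMap (fun r => (tsKey? r).map (fun k => (r, k.1, k.2)))) none
          (Or.inl hT))
      rw [ht]
      rfl
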